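-- pv_equiv track=rewrite | github.com/chopinx/file_manager | file_manager/utils.py | group_by_md5
-- ===== SOURCE A (Python) =====
-- def group_by_md5(path_md5_map):
--     md5_paths_map = {}
--     for path, md5 in path_md5_map.items():
--         if md5_paths_map.get(md5, None) is None:
--             md5_paths_map[md5] = []
--         md5_paths_map[md5].append(path)
--     for md5 in md5_paths_map.keys():
--         md5_paths_map[md5] = sorted(md5_paths_map[md5])
--     return md5_paths_map
-- ===== SOURCE B (Python) =====
-- def group_by_md5(path_md5_map):
--     # Seed one empty group per md5 (keys keep first-occurrence order),
--     # then one pass over the items sorted by path: each group comes out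
--     # already sorted, with no per-group sort call.
--     result = {md5: [] for md5 in path_md5_map.values()}
--     for path, md5 in sorted(path_md5_map.items(), key=lambda kv: kv[0]):
--         result[md5].append(path)
--     return result
-- ===== Notes on version B (the rewrite author's own statement) =====
-- stated objective: alternative
-- what changed: Instead of appending paths in input order and then sorting every group, B seeds one empty group per md5 (first-occurrence key order) and fills all groups in a single pass over the items sorted once by path, so each group comes out already sorted with no per-group sort.
import Mathlib
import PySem

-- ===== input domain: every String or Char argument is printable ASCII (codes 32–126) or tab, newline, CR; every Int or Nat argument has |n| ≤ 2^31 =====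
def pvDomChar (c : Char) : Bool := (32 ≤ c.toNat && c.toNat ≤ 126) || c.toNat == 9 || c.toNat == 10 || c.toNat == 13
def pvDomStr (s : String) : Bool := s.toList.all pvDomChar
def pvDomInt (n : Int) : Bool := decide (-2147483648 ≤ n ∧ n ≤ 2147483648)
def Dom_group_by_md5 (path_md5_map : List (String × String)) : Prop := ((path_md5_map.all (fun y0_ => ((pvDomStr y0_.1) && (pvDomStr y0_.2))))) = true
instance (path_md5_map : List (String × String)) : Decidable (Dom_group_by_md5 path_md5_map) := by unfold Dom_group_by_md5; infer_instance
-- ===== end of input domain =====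

-- B seeds one empty group per md5, then fills the groups in one pass over the items
-- sorted by path, so no per-group sort is needed (alternative decomposition).


-- ===== PORT A =====
-- if md5_paths_map.get(md5, None) is None: md5_paths_map[md5] = [] ; md5_paths_map[md5].append(path)
-- (values are lists, never None, so `get(md5, None) is None` is exactly `get? = none`;
--  the append happens at a key that is certainly present, so `modify _ [] (· ++ [path])` is exact)
def pvA_step (d : PySem.Dict String (List String)) (pm : String × String) : PySem.Dict String (List String) :=
  let d' := if d.get? pm.2 = none then d.insert pm.2 [] else d
  d'.modify pm.2 [] (fun l => l ++ [pm.1])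

def group_by_md5 (path_md5_map : List (String × String)) : List (String × List String) :=
  let md5_paths_map := path_md5_map.foldl pvA_step PySem.Dict.empty
  -- for md5 in md5_paths_map.keys(): md5_paths_map[md5] = sorted(md5_paths_map[md5])
  (md5_paths_map.keys.foldl
    (fun d md5 => d.insert md5 (PySem.List.sorted (d.getD md5 []) (fun x => x) false))
    md5_paths_map).items

-- ===== PORT B =====
def group_by_md5_alt (path_md5_map : List (String × String)) : List (String × List String) :=
  -- result = {md5: [] for md5 in path_md5_map.values()}
  let result := path_md5_map.foldl
    (fun (d : PySem.Dict String (List String)) pm => d.insert pm.2 []) PySem.Dict.empty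
  -- for path, md5 in sorted(path_md5_map.items(), key=lambda kv: kv[0]): result[md5].append(path)
  -- (md5 was seeded above, so the key is present and `modify _ [] (· ++ [path])` is exact)
  ((PySem.List.sorted path_md5_map (fun kv => kv.1) false).foldl
    (fun d pm => d.modify pm.2 [] (fun l => l ++ [pm.1])) result).items

-- ===== PRECONDITION & SPEC =====
def Spec_group_by_md5 (path_md5_map : List (String × String)) (out : List (String × List String)) : Prop := out = group_by_md5_alt path_md5_map
instance (path_md5_map : List (String × String)) (out : List (String × List String)) : Decidable (Spec_group_by_md5 path_md5_map out) := by unfold Spec_group_by_md5; infer_instance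

-- ===== CLAIM (what is proved, stated in full; the proofs are below) =====
def Claim_equal_group_by_md5 : Prop := ∀ (path_md5_map : List (String × String)), Dom_group_by_md5 path_md5_map → Spec_group_by_md5 path_md5_map (group_by_md5 path_md5_map)

-- ===== LEMMAS AND PROOFS =====

-- A's first loop: value at any key
theorem pvA_step_getD (d : PySem.Dict String (List String)) (p : String × String) (c : String) :
    (pvA_step d p).getD c [] = d.getD c [] ++ (if p.2 == c then [p.1] else []) := by
  unfold pvA_step
  by_cases hg : d.get? p.2 = none
  · have hd : d.getD p.2 [] = [] := PySem.Dict.getD_of_get?_eq_none d [] hg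
    by_cases hc : c = p.2
    · simp [hg, hc, hd]
    · have hc' : ¬ p.2 = c := fun h => hc h.symm
      simp [hg, PySem.Dict.getD_modify, PySem.Dict.getD_insert, hc, hc']
  · by_cases hc : c = p.2
    · simp [hg, PySem.Dict.getD_modify, hc]
    · have hc' : ¬ p.2 = c := fun h => hc h.symm
      simp [hg, PySem.Dict.getD_modify, hc, hc']

theorem pvA_getD (l : List (String × String)) (d : PySem.Dict String (List String)) (c : String) :
    (l.foldl pvA_step d).getD c [] = d.getD c [] ++ (l.filter (fun p => p.2 == c)).map (·.1) := by
  induction l generalizing d with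
  | nil => simp
  | cons p l ih =>
      simp only [List.foldl_cons, ih, pvA_step_getD, List.filter_cons]
      by_cases hc : p.2 == c <;> simp [hc]

-- A's first loop: keys
theorem pvA_step_keys (d : PySem.Dict String (List String)) (p : String × String) :
    (pvA_step d p).keys = PySem.Set.add d.keys p.2 := by
  unfold pvA_step
  by_cases hg : d.get? p.2 = none
  · have hc : d.contains p.2 = false := (PySem.Dict.get?_eq_none_iff_contains d p.2).mp hg
    have hne : p.2 ∉ d.keys := fun h => by
      simp [(PySem.Dict.contains_iff_mem_keys d p.2).mpr h] at hc
    rw [if_pos hg, PySem.Dict.keys_modify, PySem.Dict.keys_insert_of_contains _ _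
        (by simp),
      PySem.Dict.keys_insert_of_not_contains _ _ hc, PySem.Set.add_of_not_mem hne]
  · have hc : d.contains p.2 = true := by
      cases h : d.contains p.2
      · exact absurd ((PySem.Dict.get?_eq_none_iff_contains d p.2).mpr h) hg
      · rfl
    have hmem : p.2 ∈ d.keys := (PySem.Dict.contains_iff_mem_keys d p.2).mp hc
    rw [if_neg hg, PySem.Dict.keys_modify, PySem.Dict.keys_insert_of_contains _ _ hc,
      PySem.Set.add_of_mem hmem]

theorem pvA_keys (l : List (String × String)) (d : PySem.Dict String (List String)) :
    (l.foldl pvA_step d).keys = PySem.Set.update d.keys (l.map (·.2)) := by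
  induction l generalizing d with
  | nil => simp [PySem.Set.update]
  | cons p l ih =>
      simp only [List.foldl_cons, List.map_cons, PySem.Set.update_cons, ih, pvA_step_keys]

-- A's second loop: keys unchanged
theorem pvA2_keys (ks : List String) (d : PySem.Dict String (List String))
    (h : ∀ k ∈ ks, d.contains k = true) :
    (ks.foldl (fun d md5 => d.insert md5 (PySem.List.sorted (d.getD md5 []) (fun x => x) false)) d).keys = d.keys := by
  induction ks generalizing d with
  | nil => rfl
  | cons k ks ih =>
      simp only [List.foldl_cons]
      rw [ih _ (fun k' hk' => by
        rw [PySem.Dict.contains_insert]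
        simp [h k' (List.mem_cons_of_mem _ hk')]),
        PySem.Dict.keys_insert_of_contains _ _ (h k (List.mem_cons_self ..))]

-- A's second loop: values
theorem pvA2_getD (ks : List String) (d : PySem.Dict String (List String)) (c : String)
    (hnd : ks.Nodup) :
    (ks.foldl (fun d md5 => d.insert md5 (PySem.List.sorted (d.getD md5 []) (fun x => x) false)) d).getD c []
      = if c ∈ ks then PySem.List.sorted (d.getD c []) (fun x => x) false else d.getD c [] := by
  induction ks generalizing d with
  | nil => simp
  | cons k ks ih =>
      have hk : k ∉ ks := (List.nodup_cons.mp hnd).1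
      simp only [List.foldl_cons]
      rw [ih _ (List.nodup_cons.mp hnd).2]
      by_cases hc : c ∈ ks
      · have hck : c ≠ k := fun h => hk (h ▸ hc)
        simp [hc, PySem.Dict.getD_insert, hck]
      · by_cases hck : c = k <;> simp [hc, hck, PySem.Dict.getD_insert]

-- B's seed loop: every value is []
theorem pvB_seed_getD (l : List (String × String)) (d : PySem.Dict String (List String))
    (h : ∀ c, d.getD c ([] : List String) = []) (c : String) :
    (l.foldl (fun (d : PySem.Dict String (List String)) pm => d.insert pm.2 []) d).getD c [] = [] := by
  induction l generalizing d with
  | nil => exact h c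
  | cons p l ih =>
      simp only [List.foldl_cons]
      exact ih _ (fun c' => by rw [PySem.Dict.getD_insert]; split <;> simp [h])

-- the per-key value identity: sorting each group = filtering the path-sorted list
theorem pv_value_eq (m : List (String × String)) (c : String) :
    PySem.List.sorted ((m.filter (fun p => p.2 == c)).map (·.1)) (fun x => x) false
      = ((PySem.List.sorted m (fun kv => kv.1) false).filter (fun p => p.2 == c)).map (·.1) := by
  apply PySem.List.sorted_id_eq_of_perm_of_pairwise
  · exact ((PySem.List.sorted_perm m (fun kv => kv.1) false).filter _).map _
  · have hp := PySem.List.sorted_pairwise m (fun kv => kv.1)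
    have hf : List.Pairwise (fun a b : String × String => a.1 ≤ b.1)
        ((PySem.List.sorted m (fun kv => kv.1) false).filter (fun p => p.2 == c)) :=
      List.Pairwise.sublist List.filter_sublist hp
    exact (List.pairwise_map).mpr hf

-- ===== VERDICT (by name: the statement is the Claim_ definition above) =====
theorem group_by_md5_spec : Claim_equal_group_by_md5 := by
  intro m _
  unfold Spec_group_by_md5
  simp only [group_by_md5, group_by_md5_alt]
  -- the common key list: md5s in first-occurrence order
  have hk1 : (m.foldl pvA_step PySem.Dict.empty).keys = PySem.Set.ofList (m.map (·.2)) := by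
    rw [pvA_keys, PySem.Dict.keys_empty, PySem.Set.update_nil_left]
  have hnd1 : (m.foldl pvA_step PySem.Dict.empty).keys.Nodup := by
    rw [hk1]; exact PySem.Set.nodup_ofList _
  have hcont1 : ∀ k ∈ (m.foldl pvA_step PySem.Dict.empty).keys,
      (m.foldl pvA_step PySem.Dict.empty).contains k = true :=
    fun k hk => (PySem.Dict.contains_iff_mem_keys _ k).mpr hk
  -- A side
  have hk2 : ((m.foldl pvA_step PySem.Dict.empty).keys.foldl
      (fun d md5 => d.insert md5 (PySem.List.sorted (d.getD md5 []) (fun x => x) false))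
      (m.foldl pvA_step PySem.Dict.empty)).keys = (m.foldl pvA_step PySem.Dict.empty).keys :=
    pvA2_keys _ _ hcont1
  rw [PySem.Dict.items_eq_map_keys _ (by rw [hk2]; exact hnd1) [], hk2]
  -- B side
  have hkS : (m.foldl (fun (d : PySem.Dict String (List String)) pm => d.insert pm.2 []) PySem.Dict.empty).keys
      = PySem.Set.ofList (m.map (·.2)) := by
    rw [PySem.Dict.keys_foldl_insert_key m (fun pm => pm.2) (fun _ _ => []) PySem.Dict.empty,
      PySem.Dict.keys_empty, PySem.Set.update_nil_left]
  have hndS : (m.foldl (fun (d : PySem.Dict String (List String)) pm => d.insert pm.2 []) PySem.Dict.empty).keys.Nodup := by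
    rw [hkS]; exact PySem.Set.nodup_ofList _
  have hkF : ((PySem.List.sorted m (fun kv => kv.1) false).foldl
      (fun d pm => d.modify pm.2 [] (fun l => l ++ [pm.1]))
      (m.foldl (fun (d : PySem.Dict String (List String)) pm => d.insert pm.2 []) PySem.Dict.empty)).keys
      = PySem.Set.ofList (m.map (·.2)) := by
    rw [PySem.Dict.keys_foldl_modify_key (PySem.List.sorted m (fun kv => kv.1) false)
        (fun pm : String × String => pm.2) [] (fun _ pm => fun l => l ++ [pm.1]) _,
      hkS, PySem.Set.update_eq_append_filter]
    have hnil : (PySem.Set.ofList ((PySem.List.sorted m (fun kv => kv.1) false).map (·.2))).filter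
        (fun y => !(PySem.Set.ofList (m.map (·.2))).contains y) = [] := by
      rw [List.filter_eq_nil_iff]
      intro y hy
      have : y ∈ m.map (·.2) := by
        rcases List.mem_map.mp ((PySem.Set.mem_ofList _ y).mp hy) with ⟨p, hp, rfl⟩
        exact List.mem_map.mpr ⟨p, (PySem.List.mem_sorted m _ false p).mp hp, rfl⟩
      simp [PySem.Set.mem_ofList, this]
    rw [hnil, List.append_nil]
  rw [PySem.Dict.items_eq_map_keys _ (by rw [hkF]; exact PySem.Set.nodup_ofList _) [], hkF, hk1]
  -- both sides are maps over the same key list; compare the values pointwise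
  apply List.map_congr_left
  intro k hk
  have hA1 : ((PySem.Set.ofList (m.map (·.2))).foldl
      (fun d md5 => d.insert md5 (PySem.List.sorted (d.getD md5 []) (fun x => x) false))
      (m.foldl pvA_step PySem.Dict.empty)).getD k []
      = PySem.List.sorted ((m.foldl pvA_step PySem.Dict.empty).getD k []) (fun x => x) false := by
    rw [pvA2_getD _ _ _ (PySem.Set.nodup_ofList _), if_pos hk]
  have hA2 : (m.foldl pvA_step PySem.Dict.empty).getD k [] = (m.filter (fun p => p.2 == k)).map (·.1) := by
    rw [pvA_getD, PySem.Dict.getD_empty, List.nil_append]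
  have hB : ((PySem.List.sorted m (fun kv => kv.1) false).foldl
      (fun d pm => d.modify pm.2 [] (fun l => l ++ [pm.1]))
      (m.foldl (fun (d : PySem.Dict String (List String)) pm => d.insert pm.2 []) PySem.Dict.empty)).getD k []
      = ((PySem.List.sorted m (fun kv => kv.1) false).filter (fun p => p.2 == k)).map (·.1) := by
    have hswap : (PySem.List.sorted m (fun kv => kv.1) false).foldl
        (fun d pm => d.modify pm.2 [] (fun l => l ++ [pm.1]))
        (m.foldl (fun (d : PySem.Dict String (List String)) pm => d.insert pm.2 []) PySem.Dict.empty)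
        = ((PySem.List.sorted m (fun kv => kv.1) false).map Prod.swap).foldl
          (fun d p => d.modify p.1 [] (fun l => l ++ [p.2]))
          (m.foldl (fun (d : PySem.Dict String (List String)) pm => d.insert pm.2 []) PySem.Dict.empty) :=
      (List.foldl_map (f := Prod.swap)
        (g := fun (d : PySem.Dict String (List String)) (p : String × String) => d.modify p.1 [] (fun l => l ++ [p.2]))).symm
    rw [hswap, PySem.Dict.getD_foldl_modify_append,
      pvB_seed_getD m _ (fun c => PySem.Dict.getD_empty c []) k, List.nil_append,
      List.filter_map, List.map_map]
    simp [Function.comp_def, Prod.swap]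
  rw [hA1, hA2, hB, pv_value_eq]
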